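-- pv_equiv track=rewrite | github.com/CraigMason19/en_words | en_words/letters.py | shift_letter_down
-- ===== SOURCE A (Python) =====
-- import string
--
-- ALPHABET_LOWER = string.ascii_lowercase
--
-- ALPHABET_UPPER = string.ascii_uppercase
--
-- def letter_to_index(letter):
--     """Returns a letter's index position in the alphabet. E.g. a->0, Z->25.
--
--     Args:
--       letter:
--         The letter whoose index we want to find.
--
--     Returns:
--       An integer index of the relevant letter.
--     """
--     # Doesn't matter if we search the lower or uppercase alphabet, just choose one
--     return ALPHABET_UPPER.index(letter.capitalize())
--
-- def shift_letter_down(letter, offset):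
--     """Returns a letter that is x letters lower.
--
--     Args:
--       letter:
--         The base letter
--       offset:
--         An integer representing how many places to shift.
--
--     Returns:
--       A letter either in upper or lowercase depending on the case of the letter
--       passed in.
--
--     Raises:
--       ValueError: A offset value > 0.
--     """
--     if offset > 0:
--         raise ValueError("Shift down offset must not be higher than 0")
--     elif offset == 0:
--         return letter
--
--     alphabet = ALPHABET_LOWER
--
--     if letter.isupper():
--         alphabet = ALPHABET_UPPER
--
--     index, letter_index = -offset, letter_to_index(letter)
--
--     while index > 25:
--         index = index % 26
--
--     # For example, (b, -3) = Y
--     # letters_after = cdefghijklmnopqrstuvwxyz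
--     # letters_upto = ab
--     # inverted_alphabet = ba + zyxwvutsrqponmlkjihgfedc = bazyxwvutsrqponmlkjihgfedc
--     # Now we just got up from 'b' 3 spaces to 'y'
--     letters_after = alphabet[letter_index+1:]
--     letters_upto = alphabet[:letter_index+1]
--     inverted_alphabet = (letters_after + letters_upto)[::-1]
--
--     return inverted_alphabet[index]
-- ===== SOURCE B (Python) =====
-- import string
--
-- ALPHABET_LOWER = string.ascii_lowercase
-- ALPHABET_UPPER = string.ascii_uppercase
--
-- def letter_to_index(letter):
--     return ALPHABET_UPPER.index(letter.capitalize())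
--
-- def shift_letter_down(letter, offset):
--     """Returns a letter that is `offset` letters lower, by modular index arithmetic."""
--     if offset > 0:
--         raise ValueError("Shift down offset must not be higher than 0")
--     elif offset == 0:
--         return letter
--
--     alphabet = ALPHABET_UPPER if letter.isupper() else ALPHABET_LOWER
--     return alphabet[(letter_to_index(letter) + offset) % 26]
-- ===== Notes on version B (the rewrite author's own statement) =====
-- stated objective: simpler
-- what changed: Replaces A's build-rotated-alphabet-concatenate-reverse-then-index construction (with its manual while-loop modulus) by a single modular-arithmetic lookup alphabet[(index + offset) % 26].
import Mathlib
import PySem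

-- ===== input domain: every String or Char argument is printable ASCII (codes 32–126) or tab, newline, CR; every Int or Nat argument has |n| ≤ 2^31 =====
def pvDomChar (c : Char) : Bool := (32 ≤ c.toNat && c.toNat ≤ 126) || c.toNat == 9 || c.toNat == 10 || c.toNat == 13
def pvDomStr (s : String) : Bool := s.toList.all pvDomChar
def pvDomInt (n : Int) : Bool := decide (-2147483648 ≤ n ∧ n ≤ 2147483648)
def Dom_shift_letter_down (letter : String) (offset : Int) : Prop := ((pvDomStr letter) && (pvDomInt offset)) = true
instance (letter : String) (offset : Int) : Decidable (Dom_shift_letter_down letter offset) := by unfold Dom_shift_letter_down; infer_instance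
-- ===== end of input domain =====

-- B replaces A's build-rotated-alphabet-concatenate-reverse-then-index construction by one
-- modular-arithmetic lookup alphabet[(index + offset) % 26]; equivalence is on return values
-- (where the Pythons raise — offset > 0, or a letter the alphabet index lookup rejects — the
-- ports return "" and Pre_ excludes those inputs).

-- ===== PORT A =====
def pvAlphabetLower : List Char := "abcdefghijklmnopqrstuvwxyz".toList
def pvAlphabetUpper : List Char := "ABCDEFGHIJKLMNOPQRSTUVWXYZ".toList

-- letter.capitalize(): first char uppercased, rest lowered (exact on the ASCII domain)
def pvCapitalize (cs : List Char) : List Char :=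
  match cs with
  | [] => []
  | c :: rest => PySem.Chars.upperChar c :: PySem.Chars.lower rest

-- str.isupper(): at least one cased char and no lowercase char (exact on the ASCII domain)
def pvStrIsupper (cs : List Char) : Bool :=
  cs.any PySem.Chars.isupper && !cs.any PySem.Chars.islower

-- ALPHABET_UPPER.index(letter.capitalize()): none = ValueError
def letter_to_index (letter : String) : Option Int :=
  let f := PySem.Chars.find pvAlphabetUpper (pvCapitalize letter.toList)
  if f = -1 then none else some f

-- 'while index > 25: index = index % 26'
def pvWhileLoop (index : Int) : Int :=
  if 25 < index then pvWhileLoop (PySem.Int.mod index 26) else index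
termination_by index.toNat
decreasing_by
  have h1 := PySem.Int.mod_nonneg index (b := 26) (by omega)
  have h2 := PySem.Int.mod_lt index (b := 26) (by omega)
  omega

def shift_letter_down (letter : String) (offset : Int) : String :=
  if 0 < offset then ""          -- ValueError (excluded by Pre_)
  else if offset = 0 then letter
  else
    let alphabet := if pvStrIsupper letter.toList then pvAlphabetUpper else pvAlphabetLower
    match letter_to_index letter with
    | none => ""                 -- ValueError (excluded by Pre_)
    | some letter_index =>
      let index := pvWhileLoop (-offset)
      let letters_after := PySem.List.slice alphabet (some (letter_index + 1)) none
      let letters_upto := PySem.List.slice alphabet none (some (letter_index + 1))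
      let inverted_alphabet := (letters_after ++ letters_upto).reverse  -- [::-1] (PySem.List.slice?_none_none_neg_one)
      match PySem.List.pyGet? inverted_alphabet index with
      | some c => String.ofList [c]
      | none => ""               -- IndexError (unreachable under Pre_)

-- ===== PORT B =====
def shift_letter_down_alt (letter : String) (offset : Int) : String :=
  if 0 < offset then ""          -- ValueError (excluded by Pre_)
  else if offset = 0 then letter
  else
    let alphabet := if pvStrIsupper letter.toList then pvAlphabetUpper else pvAlphabetLower
    match letter_to_index letter with
    | none => ""                 -- ValueError (excluded by Pre_)
    | some li =>
      match PySem.List.pyGet? alphabet (PySem.Int.mod (li + offset) 26) with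
      | some c => String.ofList [c]
      | none => ""

-- ===== PRECONDITION & SPEC =====
-- Pre_ excludes exactly the inputs where the Python raises: offset > 0 (explicit ValueError),
-- and, when offset < 0, a letter that is neither empty nor a single ASCII letter
-- (ALPHABET_UPPER.index raises ValueError).  Note '' is admitted: A returns a value there.
def pvLetterOK (letter : String) : Bool :=
  match letter.toList with
  | [] => true
  | [c] => c.isAlpha
  | _ => false

def Pre_shift_letter_down (letter : String) (offset : Int) : Prop :=
  offset ≤ 0 ∧ (offset = 0 ∨ pvLetterOK letter = true)
instance (letter : String) (offset : Int) : Decidable (Pre_shift_letter_down letter offset) := by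
  unfold Pre_shift_letter_down; infer_instance

def pvWitness_shift_letter_down : String × Int := ("b", -3)

def Spec_shift_letter_down (letter : String) (offset : Int) (out : String) : Prop :=
  out = shift_letter_down_alt letter offset
instance (letter : String) (offset : Int) (out : String) : Decidable (Spec_shift_letter_down letter offset out) := by
  unfold Spec_shift_letter_down; infer_instance

-- ===== CLAIM (what is proved, stated in full; the proofs are below) =====
def Claim_equal_shift_letter_down : Prop :=
  ∀ (letter : String) (offset : Int), Dom_shift_letter_down letter offset →
    Pre_shift_letter_down letter offset →
    Spec_shift_letter_down letter offset (shift_letter_down letter offset)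

-- ===== LEMMAS AND PROOFS =====

-- the while loop normalises 1 ≤ n to a representative of n mod 26 in [0, 25]
theorem pvWhileLoop_spec (n : Int) (hn : 1 ≤ n) :
    0 ≤ pvWhileLoop n ∧ pvWhileLoop n ≤ 25 ∧ pvWhileLoop n % 26 = n % 26 := by
  rw [pvWhileLoop]
  by_cases h : 25 < n
  · rw [if_pos h]
    rw [PySem.Int.mod_eq_emod_of_pos (a := n) (by omega)]
    have h1 : 0 ≤ n % 26 := Int.emod_nonneg n (by omega)
    have h2 : n % 26 < 26 := Int.emod_lt_of_pos n (by omega)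
    rw [pvWhileLoop, if_neg (by omega : ¬ 25 < n % 26)]
    omega
  · rw [if_neg h]
    omega

-- a successful alphabet-index lookup lies in [0, 26)
theorem letter_to_index_bounds (letter : String) (li : Int)
    (h : letter_to_index letter = some li) : 0 ≤ li ∧ li < 26 := by
  unfold letter_to_index at h
  set f := PySem.Chars.find pvAlphabetUpper (pvCapitalize letter.toList) with hf
  by_cases h1 : f = -1
  · simp [h1] at h
  · simp [h1] at h
    subst h
    have hge := PySem.Chars.neg_one_le_find pvAlphabetUpper (pvCapitalize letter.toList)
    have hle := PySem.Chars.find_le_length pvAlphabetUpper (pvCapitalize letter.toList)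
    rw [← hf] at hge hle
    have hlen : (pvAlphabetUpper.length : Int) = 26 := by decide
    refine ⟨by omega, ?_⟩
    by_cases h26 : f = 26
    · -- find = length ⇒ the needle is a prefix of [], hence []; but find [] = 0 ≠ 26
      have hpos : 0 ≤ f := by omega
      have hspec := PySem.Chars.find_spec (s := pvAlphabetUpper) (sub := pvCapitalize letter.toList) (by rw [← hf]; omega)
      rw [← hf, h26] at hspec
      have hdrop : pvAlphabetUpper.drop (Int.toNat 26) = [] := by decide
      rw [hdrop] at hspec
      have hnil : pvCapitalize letter.toList = [] := List.prefix_nil.mp hspec.1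
      rw [hnil] at hf
      rw [PySem.Chars.find_nil] at hf
      omega
    · omega

-- core index identity: reversing the rotated alphabet and indexing with the reduced
-- while-loop value equals one modular lookup in the plain alphabet
theorem pvRotate_reverse_get (alph : List Char) (li n : Int)
    (hlen : alph.length = 26) (hli0 : 0 ≤ li) (hli : li < 26) (hn : 1 ≤ n) :
    PySem.List.pyGet?
      ((PySem.List.slice alph (some (li + 1)) none ++
        PySem.List.slice alph none (some (li + 1))).reverse)
      (pvWhileLoop n)
    = PySem.List.pyGet? alph (PySem.Int.mod (li - n) 26) := by
  obtain ⟨hi0, hi25, himod⟩ := pvWhileLoop_spec n hn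
  set i := pvWhileLoop n with hidef
  rw [PySem.List.slice_from alph (by omega), PySem.List.slice_to alph (by omega)]
  have hk : (li + 1).toNat ≤ alph.length := by omega
  rw [← List.rotate_eq_drop_append_take hk]
  -- both sides are in-range gets; reduce to getElem
  have hrlen : ((alph.rotate (li + 1).toNat).reverse).length = 26 := by
    simp [List.length_reverse, List.length_rotate, hlen]
  have hm0 : 0 ≤ PySem.Int.mod (li - n) 26 := PySem.Int.mod_nonneg _ (by omega)
  have hmlt : PySem.Int.mod (li - n) 26 < 26 := PySem.Int.mod_lt _ (by omega)
  rw [PySem.Int.mod_eq_emod_of_pos (a := li - n) (by omega)] at hm0 hmlt ⊢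
  rw [PySem.List.pyGet?_of_nonneg _ hi0, PySem.List.pyGet?_of_nonneg _ hm0]
  rw [List.getElem?_eq_getElem (by omega), List.getElem?_eq_getElem (by omega)]
  congr 1
  rw [List.getElem_reverse, List.getElem_rotate]
  congr 1
  -- pure arithmetic on the indices
  have h1 : i.toNat % 26 = (n % 26).toNat := by omega
  have h2 : ((li - n) % 26).toNat = ((li - n) % 26).toNat := rfl
  simp only [List.length_rotate, hlen]
  omega

-- ===== VERDICT =====
theorem shift_letter_down_spec : Claim_equal_shift_letter_down := by
  intro letter offset _hdom hpre
  unfold Spec_shift_letter_down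
  unfold shift_letter_down shift_letter_down_alt
  obtain ⟨hle, _⟩ := hpre
  by_cases hpos : 0 < offset
  · omega
  · simp only [hpos, if_false]
    by_cases h0 : offset = 0
    · simp [h0]
    · simp only [h0, if_false]
      cases hidx : letter_to_index letter with
      | none => rfl
      | some li =>
        obtain ⟨hli0, hli26⟩ := letter_to_index_bounds letter li hidx
        have hlen : (if pvStrIsupper letter.toList then pvAlphabetUpper else pvAlphabetLower).length = 26 := by
          by_cases hu : pvStrIsupper letter.toList <;> simp [hu] <;> decide
        have hkey := pvRotate_reverse_get
          (if pvStrIsupper letter.toList then pvAlphabetUpper else pvAlphabetLower)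
          li (-offset) hlen hli0 hli26 (by omega)
        have hsub : li - -offset = li + offset := by ring
        rw [hsub] at hkey
        dsimp only
        rw [hkey]
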